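-- pv_equiv track=rewrite | github.com/faizzyhon/Cyberburg | modules/dir_bruteforce.py | _check_path_sensitivity
-- ===== SOURCE A (Python) =====
-- def _check_path_sensitivity(path: str) -> str:
--     """Determine severity based on path sensitivity."""
--     path_lower = path.lower()
--
--     critical_keywords = [
--         '.env', '.git', 'config.php', 'wp-config', '.htpasswd',
--         'shell.php', 'c99', 'r57', 'backup.sql', 'database.sql',
--         'dump.sql', '/etc/passwd', 'phpinfo', 'proc/self',
--     ]
--     high_keywords = [
--         'admin', 'phpmyadmin', 'pma', 'backup', 'upload',
--         'shell', 'console', 'debug', '.svn', 'sql', 'db',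
--         'api-docs', 'swagger', 'graphql', 'server-status',
--     ]
--     medium_keywords = [
--         'login', 'auth', 'user', 'account', 'test', 'api',
--         'panel', 'dashboard', 'manage', 'manager',
--     ]
--
--     for kw in critical_keywords:
--         if kw in path_lower:
--             return "CRITICAL"
--     for kw in high_keywords:
--         if kw in path_lower:
--             return "HIGH"
--     for kw in medium_keywords:
--         if kw in path_lower:
--             return "MEDIUM"
--     return "INFO"
-- ===== SOURCE B (Python) =====
-- _SEVERITY_TABLE = (
--     [(kw, 0) for kw in [
--         '.env', '.git', 'config.php', 'wp-config', '.htpasswd',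
--         'shell.php', 'c99', 'r57', 'backup.sql', 'database.sql',
--         'dump.sql', '/etc/passwd', 'phpinfo', 'proc/self',
--     ]]
--     + [(kw, 1) for kw in [
--         'admin', 'phpmyadmin', 'pma', 'backup', 'upload',
--         'shell', 'console', 'debug', '.svn', 'sql', 'db',
--         'api-docs', 'swagger', 'graphql', 'server-status',
--     ]]
--     + [(kw, 2) for kw in [
--         'login', 'auth', 'user', 'account', 'test', 'api',
--         'panel', 'dashboard', 'manage', 'manager',
--     ]]
-- )
--
-- _RANK_TO_SEVERITY = ["CRITICAL", "HIGH", "MEDIUM", "INFO"]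
--
--
-- def _check_path_sensitivity(path: str) -> str:
--     """Determine severity based on path sensitivity."""
--     path_lower = path.lower()
--     best = 3
--     for kw, rank in _SEVERITY_TABLE:
--         if rank < best and kw in path_lower:
--             best = rank
--     return _RANK_TO_SEVERITY[best]
-- ===== Notes on version B (the rewrite author's own statement) =====
-- stated objective: alternative
-- what changed: Replaced A's three ordered early-return loops over separate keyword lists by one accumulating minimum-rank scan over a single flat keyword->rank table, mapping the best rank back to a severity string at the end.
import Mathlib
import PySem

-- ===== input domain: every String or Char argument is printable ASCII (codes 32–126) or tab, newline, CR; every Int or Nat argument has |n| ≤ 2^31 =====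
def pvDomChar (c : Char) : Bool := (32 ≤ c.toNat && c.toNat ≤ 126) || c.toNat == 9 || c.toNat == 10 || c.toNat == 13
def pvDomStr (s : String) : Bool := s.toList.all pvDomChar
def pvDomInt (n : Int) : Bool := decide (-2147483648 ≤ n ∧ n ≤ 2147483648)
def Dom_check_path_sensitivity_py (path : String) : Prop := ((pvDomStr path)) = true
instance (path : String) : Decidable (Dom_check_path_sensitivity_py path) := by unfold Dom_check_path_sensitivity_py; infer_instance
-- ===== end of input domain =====

-- B replaces A's three ordered early-return keyword loops by one minimum-rank scan
-- over a single flat keyword->rank table (objective: alternative decomposition).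


-- ===== PORT A =====
def pvCritical : List String :=
  [".env", ".git", "config.php", "wp-config", ".htpasswd",
   "shell.php", "c99", "r57", "backup.sql", "database.sql",
   "dump.sql", "/etc/passwd", "phpinfo", "proc/self"]
def pvHigh : List String :=
  ["admin", "phpmyadmin", "pma", "backup", "upload",
   "shell", "console", "debug", ".svn", "sql", "db",
   "api-docs", "swagger", "graphql", "server-status"]
def pvMedium : List String :=
  ["login", "auth", "user", "account", "test", "api",
   "panel", "dashboard", "manage", "manager"]

-- A's 'for kw in …: if kw in path_lower: return …' loop, one keyword at a time
def pvScanA (pl : String) : List String → Bool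
  | [] => false
  | kw :: rest => if PySem.Str.isIn kw pl then true else pvScanA pl rest

def check_path_sensitivity_py (path : String) : String :=
  let path_lower := PySem.Str.lower path
  if pvScanA path_lower pvCritical then "CRITICAL"
  else if pvScanA path_lower pvHigh then "HIGH"
  else if pvScanA path_lower pvMedium then "MEDIUM"
  else "INFO"

-- ===== PORT B =====
def pvSeverityTable : List (String × Nat) :=
  pvCritical.map (fun kw => (kw, 0)) ++ pvHigh.map (fun kw => (kw, 1))
    ++ pvMedium.map (fun kw => (kw, 2))

def pvRankToSeverity : List String := ["CRITICAL", "HIGH", "MEDIUM", "INFO"]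

def check_path_sensitivity_py_alt (path : String) : String :=
  let path_lower := PySem.Str.lower path
  let best := pvSeverityTable.foldl
    (fun b kr => if kr.2 < b ∧ PySem.Str.isIn kr.1 path_lower = true then kr.2 else b) 3
  pvRankToSeverity.getD best "INFO"

-- ===== PRECONDITION & SPEC =====
def Spec_check_path_sensitivity_py (path : String) (out : String) : Prop := out = check_path_sensitivity_py_alt path
instance (path : String) (out : String) : Decidable (Spec_check_path_sensitivity_py path out) := by unfold Spec_check_path_sensitivity_py; infer_instance

-- ===== CLAIM (what is proved, stated in full; the proofs are below) =====
def Claim_equal_check_path_sensitivity_py : Prop := ∀ (path : String), Dom_check_path_sensitivity_py path → Spec_check_path_sensitivity_py path (check_path_sensitivity_py path)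

-- ===== LEMMAS AND PROOFS =====

theorem pvScanA_eq_any (pl : String) (kws : List String) :
    pvScanA pl kws = kws.any (fun kw => PySem.Str.isIn kw pl) := by
  induction kws with
  | nil => rfl
  | cons kw rest ih =>
    simp only [pvScanA, List.any_cons]
    by_cases h : PySem.Str.isIn kw pl = true <;> simp [ih]

theorem pvFold_const_rank (pl : String) (kws : List String) (r b : Nat) :
    (kws.map (fun kw => (kw, r))).foldl
      (fun b kr => if kr.2 < b ∧ PySem.Str.isIn kr.1 pl = true then kr.2 else b) b
    = if r < b ∧ kws.any (fun kw => PySem.Str.isIn kw pl) = true then r else b := by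
  induction kws generalizing b with
  | nil => simp
  | cons kw rest ih =>
    simp only [List.map_cons, List.foldl_cons, List.any_cons]
    by_cases h1 : PySem.Str.isIn kw pl = true
    · by_cases h2' : r < b
      · rw [if_pos ⟨h2', h1⟩, ih,
          if_neg (fun h => absurd h.1 (lt_irrefl r)),
          if_pos ⟨h2', by rw [h1, Bool.true_or]⟩]
      · rw [if_neg (fun h => h2' h.1), ih,
          if_neg (fun h => h2' h.1), if_neg (fun h => h2' h.1)]
    · have h1' : PySem.Str.isIn kw pl = false := by
        cases h : PySem.Str.isIn kw pl
        · rfl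
        · exact absurd h h1
      rw [if_neg (fun h => h1 h.2), ih]
      simp only [h1', Bool.false_or]

-- ===== VERDICT (by name: the statement is the Claim_ definition above) =====
theorem check_path_sensitivity_py_spec : Claim_equal_check_path_sensitivity_py := by
  intro path _
  show check_path_sensitivity_py path = check_path_sensitivity_py_alt path
  simp only [check_path_sensitivity_py, check_path_sensitivity_py_alt, pvSeverityTable,
    List.foldl_append, pvFold_const_rank, pvScanA_eq_any]
  cases hC : pvCritical.any (fun kw => PySem.Str.isIn kw (PySem.Str.lower path)) <;>
  cases hH : pvHigh.any (fun kw => PySem.Str.isIn kw (PySem.Str.lower path)) <;>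
  cases hM : pvMedium.any (fun kw => PySem.Str.isIn kw (PySem.Str.lower path)) <;>
    simp [pvRankToSeverity]
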